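-- pv_equiv track=rewrite | github.com/marcW21/knowledge-graph-team-10 | src/resolve_alias.py | choose_canonical
-- ===== SOURCE A (Python) =====
-- from collections import Counter, defaultdict
-- from typing import Dict, Iterator, List, Set, Tuple
--
-- def choose_canonical(raw_mentions: List[str]) -> str:
--     """Prefer title-case, then most frequent, then longest, then lexicographic."""
--     counts = Counter(raw_mentions)
--
--     def _key(name: str) -> Tuple[int, int, int, str]:
--         words = name.split()
--         is_title = bool(words) and all(
--             w[0].isupper() if w[0].isalpha() else True for w in words
--         ) and not name.isupper()
--         return (int(is_title), counts[name], len(name), name)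
--
--     return max(counts, key=_key)
-- ===== SOURCE B (Python) =====
-- def choose_canonical(raw_mentions):
--     """Prefer title-case, then most frequent, then longest, then lexicographic."""
--     counts = {}
--     for m in raw_mentions:
--         counts[m] = counts.get(m, 0) + 1
--     names = list(counts)
--
--     def _is_title(name):
--         words = name.split()
--         return bool(words) and all(
--             w[0].isupper() if w[0].isalpha() else True for w in words
--         ) and not name.isupper()
--
--     pool = [n for n in names if _is_title(n)] or names
--     best_count = max(counts[n] for n in pool)
--     pool = [n for n in pool if counts[n] == best_count]
--     best_len = max(len(n) for n in pool)
--     pool = [n for n in pool if len(n) == best_len]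
--     return max(pool)
-- ===== Notes on version B (the rewrite author's own statement) =====
-- stated objective: alternative
-- what changed: A computes one max over the dict with a 4-tuple key; B partitions the unique names into a title-case pool (falling back to all names), then filters that pool down in separate passes by maximal count, then maximal length, and finally takes the lexicographic maximum.
-- outside the precondition, e.g. on choose_canonical([]): A raises ValueError, B raises ValueError
import Mathlib
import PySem

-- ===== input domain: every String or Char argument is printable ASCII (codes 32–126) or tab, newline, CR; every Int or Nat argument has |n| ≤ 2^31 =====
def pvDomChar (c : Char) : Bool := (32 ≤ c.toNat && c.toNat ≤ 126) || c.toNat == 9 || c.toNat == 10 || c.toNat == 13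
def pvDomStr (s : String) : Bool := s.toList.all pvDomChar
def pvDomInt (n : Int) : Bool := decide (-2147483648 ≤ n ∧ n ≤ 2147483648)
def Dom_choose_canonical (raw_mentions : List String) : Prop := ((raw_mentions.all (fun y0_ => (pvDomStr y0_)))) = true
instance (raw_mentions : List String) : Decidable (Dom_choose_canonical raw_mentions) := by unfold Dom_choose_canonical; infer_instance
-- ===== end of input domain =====

-- B replaces A's single max with a tuple key by staged multi-pass filtering (title pool, then max count, max length, lexicographic max); objective: alternative decomposition, same cost.

-- ===== PORT A =====
-- Python str.isupper(): at least one cased character and no lowercase one; exact on the ASCII domain (cased = letters)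
def pyStrIsupper (s : String) : Bool :=
  s.toList.any PySem.Str.isalpha && s.toList.all (fun c => !PySem.Str.islower c)

-- 'w[0].isupper() if w[0].isalpha() else True'; words from split() are never empty, so the none-branch is unreachable
def pyWordCap (w : String) : Bool :=
  match PySem.Str.pyGet? w 0 with
  | some c => if PySem.Str.isalpha c then PySem.Str.isupper c else true
  | none => true

-- the is_title predicate of _key (identical code in A and B)
def isTitleName (name : String) : Bool :=
  let words := PySem.Str.split₀ name
  !words.isEmpty && words.all pyWordCap && !pyStrIsupper name

-- A's _key tuple (int(is_title), counts[name], len(name), name)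
def ccKey (counts : PySem.Dict String Int) (name : String) : Int × Int × Int × String :=
  ((if isTitleName name then (1 : Int) else 0), counts.getD name 0, PySem.Str.len name, name)

-- Python's '<' on these 4-tuples: lexicographic, component by component
def pyTupLt (a b : Int × Int × Int × String) : Bool :=
  decide (a.1 < b.1) || (a.1 == b.1 &&
    (decide (a.2.1 < b.2.1) || (a.2.1 == b.2.1 &&
      (decide (a.2.2.1 < b.2.2.1) || (a.2.2.1 == b.2.2.1 && decide (a.2.2.2 < b.2.2.2))))))

def choose_canonical (raw_mentions : List String) : String :=
  let counts := PySem.Dict.counter raw_mentions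
  match counts.keys with
  | [] => ""   -- Python: max() over the empty dict raises ValueError; excluded by Pre_
  | h :: t =>
    t.foldl (fun best x => if pyTupLt (ccKey counts best) (ccKey counts x) then x else best) h

-- ===== PORT B =====
def choose_canonical_alt (raw_mentions : List String) : String :=
  let counts := raw_mentions.foldl (fun d x => d.insert x (d.getD x 0 + 1)) (PySem.Dict.empty : PySem.Dict String Int)
  let names := counts.keys
  let titled := names.filter isTitleName
  let pool0 := if titled.isEmpty then names else titled
  match PySem.List.max? (pool0.map (fun n => counts.getD n 0)) (fun v => v) with
  | none => ""   -- Python: max() over an empty sequence raises ValueError; excluded by Pre_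
  | some bc =>
    let pool1 := pool0.filter (fun n => counts.getD n 0 == bc)
    match PySem.List.max? (pool1.map (fun n => PySem.Str.len n)) (fun v => v) with
    | none => ""
    | some bl =>
      let pool2 := pool1.filter (fun n => PySem.Str.len n == bl)
      match PySem.List.max? pool2 (fun n => n) with
      | none => ""
      | some r => r

-- ===== PRECONDITION & SPEC =====
-- Pre_ excludes only the empty list, on which both A and B raise ValueError (max() of an empty sequence)
def Pre_choose_canonical (raw_mentions : List String) : Prop := raw_mentions ≠ []
instance (raw_mentions : List String) : Decidable (Pre_choose_canonical raw_mentions) := by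
  unfold Pre_choose_canonical; infer_instance
def pvWitness_choose_canonical : List String := ["Alice", "alice", "Alice"]

def Spec_choose_canonical (raw_mentions : List String) (out : String) : Prop :=
  out = choose_canonical_alt raw_mentions
instance (raw_mentions : List String) (out : String) : Decidable (Spec_choose_canonical raw_mentions out) := by
  unfold Spec_choose_canonical; infer_instance

-- ===== CLAIM (what is proved, stated in full; the proofs are below) =====
def Claim_equal_choose_canonical : Prop := ∀ (raw_mentions : List String),
  Dom_choose_canonical raw_mentions → Pre_choose_canonical raw_mentions →
  Spec_choose_canonical raw_mentions (choose_canonical raw_mentions)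

-- ===== LEMMAS AND PROOFS =====

-- proof-side view of the tuple order as Mathlib's Lex linear order
def L4 (a : Int × Int × Int × String) : Lex (Int × Lex (Int × Lex (Int × String))) :=
  toLex (a.1, toLex (a.2.1, toLex (a.2.2.1, a.2.2.2)))

lemma pyTupLt_iff (a b : Int × Int × Int × String) : pyTupLt a b = true ↔ L4 a < L4 b := by
  simp [pyTupLt, L4, Prod.Lex.toLex_lt_toLex]

lemma foldl_max_spec {α κ : Type} [LinearOrder κ] (key : α → κ) :
    ∀ (l : List α) (b : α),
      ((l.foldl (fun best x => if key best < key x then x else best) b) = b ∨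
        (l.foldl (fun best x => if key best < key x then x else best) b) ∈ l) ∧
      key b ≤ key (l.foldl (fun best x => if key best < key x then x else best) b) ∧
      ∀ y ∈ l, key y ≤ key (l.foldl (fun best x => if key best < key x then x else best) b) := by
  intro l
  induction l with
  | nil => simp
  | cons x t ih =>
    intro b
    simp only [List.foldl_cons]
    obtain ⟨hmem, hb, hall⟩ := ih (if key b < key x then x else b)
    refine ⟨?_, ?_, ?_⟩
    · rcases hmem with h | h
      · rw [h]; split_ifs with hx
        · exact Or.inr (List.mem_cons_self)
        · exact Or.inl rfl
      · exact Or.inr (List.mem_cons_of_mem _ h)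
    · refine le_trans ?_ hb
      split_ifs with hx
      · exact le_of_lt hx
      · exact le_refl _
    · intro y hy
      rcases List.mem_cons.mp hy with rfl | hy
      · refine le_trans ?_ hb
        split_ifs with hx
        · exact le_refl _
        · exact not_lt.mp hx
      · exact hall y hy

-- the staged pipeline of B picks the strict ccKey-maximum of a nodup nonempty key list
lemma staged_spec (C : PySem.Dict String Int) (ks : List String)
    (hnd : ks.Nodup) (hne : ks ≠ []) :
    ∃ bc bl r,
      PySem.List.max? ((if (ks.filter isTitleName).isEmpty then ks else ks.filter isTitleName).map
        (fun n => C.getD n 0)) (fun v => v) = some bc ∧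
      PySem.List.max? (((if (ks.filter isTitleName).isEmpty then ks else ks.filter isTitleName).filter
        (fun n => C.getD n 0 == bc)).map (fun n => PySem.Str.len n)) (fun v => v) = some bl ∧
      PySem.List.max?
        (((if (ks.filter isTitleName).isEmpty then ks else ks.filter isTitleName).filter
          (fun n => C.getD n 0 == bc)).filter (fun n => PySem.Str.len n == bl))
        (fun n => n) = some r ∧
      r ∈ ks ∧ ∀ y ∈ ks, y ≠ r → L4 (ccKey C y) < L4 (ccKey C r) := by
  set titled := ks.filter isTitleName with htitled
  set pool0 := if titled.isEmpty then ks else titled with hpool0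
  have h0sub : ∀ n ∈ pool0, n ∈ ks := by
    intro n hn
    rw [hpool0] at hn
    split at hn
    · exact hn
    · exact List.mem_of_mem_filter hn
  have h0ne : pool0 ≠ [] := by
    rw [hpool0]
    split
    · exact hne
    · next hf => simpa [List.isEmpty_iff] using hf
  have h0nd : pool0.Nodup := by
    rw [hpool0]; split
    · exact hnd
    · exact hnd.filter _
  have htconst : ∀ a ∈ pool0, ∀ b ∈ pool0, isTitleName a = isTitleName b := by
    intro a ha b hb
    rw [hpool0] at ha hb
    by_cases hf : titled.isEmpty
    · rw [if_pos hf] at ha hb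
      have hnilt : titled = [] := List.isEmpty_iff.mp hf
      have h1 := List.filter_eq_nil_iff.mp hnilt a ha
      have h2 := List.filter_eq_nil_iff.mp hnilt b hb
      simp only [Bool.not_eq_true] at h1 h2
      rw [h1, h2]
    · rw [if_neg hf] at ha hb
      rw [(List.mem_filter.mp ha).2, (List.mem_filter.mp hb).2]
  have hout : ∀ y ∈ ks, y ∉ pool0 → ∀ n ∈ pool0,
      (if isTitleName y then (1 : Int) else 0) < (if isTitleName n then (1 : Int) else 0) := by
    intro y hy hyn n hn
    rw [hpool0] at hyn hn
    by_cases hf : titled.isEmpty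
    · rw [if_pos hf] at hyn
      exact absurd hy hyn
    · rw [if_neg hf] at hyn hn
      have hty : ¬ isTitleName y = true := fun ht => hyn (List.mem_filter.mpr ⟨hy, ht⟩)
      have htn : isTitleName n = true := (List.mem_filter.mp hn).2
      simp [hty, htn]
  -- stage 1: maximal count
  obtain ⟨bc, hm1⟩ : ∃ bc, PySem.List.max? (pool0.map (fun n => C.getD n 0)) (fun v => v) = some bc :=
    Option.ne_none_iff_exists'.mp
      (fun hnone => h0ne (List.map_eq_nil_iff.mp ((PySem.List.max?_eq_none_iff _ _).mp hnone)))
  have hbcmem : bc ∈ pool0.map (fun n => C.getD n 0) := PySem.List.max?_mem hm1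
  obtain ⟨n0, hn0, hn0c⟩ := List.mem_map.mp hbcmem
  have hbcmax : ∀ n ∈ pool0, C.getD n 0 ≤ bc := by
    intro n hn
    exact PySem.List.max?_isMax hm1 _ (List.mem_map.mpr ⟨n, hn, rfl⟩)
  set pool1 := pool0.filter (fun n => C.getD n 0 == bc) with hpool1
  have h1sub : ∀ n ∈ pool1, n ∈ pool0 := fun n hn => List.mem_of_mem_filter hn
  have h1c : ∀ n ∈ pool1, C.getD n 0 = bc := by
    intro n hn; exact beq_iff_eq.mp (List.mem_filter.mp hn).2
  have h1out : ∀ y ∈ pool0, y ∉ pool1 → C.getD y 0 < bc := by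
    intro y hy hyn
    refine lt_of_le_of_ne (hbcmax y hy) (fun he => hyn ?_)
    exact List.mem_filter.mpr ⟨hy, beq_iff_eq.mpr he⟩
  have h1ne : pool1 ≠ [] := by
    intro hnil
    have : n0 ∈ pool1 := List.mem_filter.mpr ⟨hn0, beq_iff_eq.mpr hn0c⟩
    rw [hnil] at this; exact (List.not_mem_nil) this
  -- stage 2: maximal length
  obtain ⟨bl, hm2⟩ : ∃ bl, PySem.List.max? (pool1.map (fun n => PySem.Str.len n)) (fun v => v) = some bl :=
    Option.ne_none_iff_exists'.mp
      (fun hnone => h1ne (List.map_eq_nil_iff.mp ((PySem.List.max?_eq_none_iff _ _).mp hnone)))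
  have hblmem : bl ∈ pool1.map (fun n => PySem.Str.len n) := PySem.List.max?_mem hm2
  obtain ⟨n1, hn1, hn1l⟩ := List.mem_map.mp hblmem
  have hblmax : ∀ n ∈ pool1, PySem.Str.len n ≤ bl := by
    intro n hn
    exact PySem.List.max?_isMax hm2 _ (List.mem_map.mpr ⟨n, hn, rfl⟩)
  set pool2 := pool1.filter (fun n => PySem.Str.len n == bl) with hpool2
  have h2sub : ∀ n ∈ pool2, n ∈ pool1 := fun n hn => List.mem_of_mem_filter hn
  have h2l : ∀ n ∈ pool2, PySem.Str.len n = bl := by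
    intro n hn; exact beq_iff_eq.mp (List.mem_filter.mp hn).2
  have h2out : ∀ y ∈ pool1, y ∉ pool2 → PySem.Str.len y < bl := by
    intro y hy hyn
    refine lt_of_le_of_ne (hblmax y hy) (fun he => hyn ?_)
    exact List.mem_filter.mpr ⟨hy, beq_iff_eq.mpr he⟩
  have h2ne : pool2 ≠ [] := by
    intro hnil
    have : n1 ∈ pool2 := List.mem_filter.mpr ⟨hn1, beq_iff_eq.mpr hn1l⟩
    rw [hnil] at this; exact (List.not_mem_nil) this
  -- stage 3: lexicographically greatest
  obtain ⟨r, hm3⟩ : ∃ r, PySem.List.max? pool2 (fun n => n) = some r :=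
    Option.ne_none_iff_exists'.mp
      (fun hnone => h2ne ((PySem.List.max?_eq_none_iff _ _).mp hnone))
  have hrmem : r ∈ pool2 := PySem.List.max?_mem hm3
  have hrmax : ∀ y ∈ pool2, y ≤ r := fun y hy => PySem.List.max?_isMax hm3 y hy
  refine ⟨bc, bl, r, hm1, hm2, hm3, h0sub r (h1sub r (h2sub r hrmem)), ?_⟩
  intro y hy hyr
  have hr0 : r ∈ pool0 := h1sub r (h2sub r hrmem)
  simp only [L4, ccKey, Prod.Lex.toLex_lt_toLex]
  by_cases hy0 : y ∈ pool0
  · have ht : (if isTitleName y then (1 : Int) else 0) = (if isTitleName r then (1 : Int) else 0) := by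
      rw [htconst y hy0 r hr0]
    right
    refine ⟨ht, ?_⟩
    by_cases hy1 : y ∈ pool1
    · have hc : C.getD y 0 = C.getD r 0 := by
        rw [h1c y hy1, h1c r (h2sub r hrmem)]
      right
      refine ⟨hc, ?_⟩
      by_cases hy2 : y ∈ pool2
      · right
        exact ⟨by rw [h2l y hy2, h2l r hrmem], lt_of_le_of_ne (hrmax y hy2) hyr⟩
      · left
        rw [h2l r hrmem]
        exact h2out y hy1 hy2
    · left
      rw [h1c r (h2sub r hrmem)]
      exact h1out y hy0 hy1
  · left
    exact hout y hy hy0 r hr0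

-- B's result is in the key set and is the strict ccKey-maximum there
lemma alt_spec (raw : List String) (h : raw ≠ []) :
    choose_canonical_alt raw ∈ (PySem.Dict.counter raw).keys ∧
    ∀ y ∈ (PySem.Dict.counter raw).keys, y ≠ choose_canonical_alt raw →
      L4 (ccKey (PySem.Dict.counter raw) y) < L4 (ccKey (PySem.Dict.counter raw) (choose_canonical_alt raw)) := by
  have hnd : (PySem.Dict.counter raw).keys.Nodup := by
    rw [PySem.Dict.keys_counter]; exact PySem.Set.nodup_ofList raw
  have hne : (PySem.Dict.counter raw).keys ≠ [] := by
    cases raw with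
    | nil => exact absurd rfl h
    | cons m rest =>
      intro hnil
      have : m ∈ (PySem.Dict.counter (m :: rest)).keys := by
        rw [PySem.Dict.keys_counter]
        exact (PySem.Set.mem_ofList _ _).mpr (List.mem_cons_self)
      rw [hnil] at this; exact (List.not_mem_nil) this
  obtain ⟨bc, bl, r, hm1, hm2, hm3, hr, hmax⟩ :=
    staged_spec (PySem.Dict.counter raw) (PySem.Dict.counter raw).keys hnd hne
  have halt : choose_canonical_alt raw = r := by
    simp only [choose_canonical_alt]
    rw [PySem.Dict.foldl_insert_getD_add_one_eq_counter]
    simp only [hm1, hm2, hm3]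
  rw [halt]
  exact ⟨hr, hmax⟩

theorem choose_canonical_spec : Claim_equal_choose_canonical := by
  intro raw _ hpre
  unfold Spec_choose_canonical
  obtain ⟨hmem, hmax⟩ := alt_spec raw hpre
  cases hks : (PySem.Dict.counter raw).keys with
  | nil =>
    exfalso
    rw [hks] at hmem; exact (List.not_mem_nil).elim hmem
  | cons hd tl =>
    simp only [choose_canonical, hks]
    have hfun : (fun (best x : String) =>
        if pyTupLt (ccKey (PySem.Dict.counter raw) best) (ccKey (PySem.Dict.counter raw) x) then x else best)
      = (fun best x =>
        if L4 (ccKey (PySem.Dict.counter raw) best) < L4 (ccKey (PySem.Dict.counter raw) x) then x else best) := by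
      funext best x
      simp only [pyTupLt_iff]
    rw [hfun]
    obtain ⟨rmem, rhd, rall⟩ := foldl_max_spec (fun n => L4 (ccKey (PySem.Dict.counter raw) n)) tl hd
    set r := tl.foldl (fun best x => if L4 (ccKey (PySem.Dict.counter raw) best) < L4 (ccKey (PySem.Dict.counter raw) x) then x else best) hd with hr
    by_contra hne
    have hrks : r ∈ (PySem.Dict.counter raw).keys := by
      rw [hks]
      rcases rmem with h | h
      · rw [h]; exact List.mem_cons_self
      · exact List.mem_cons_of_mem _ h
    have h1 : L4 (ccKey (PySem.Dict.counter raw) r) < L4 (ccKey (PySem.Dict.counter raw) (choose_canonical_alt raw)) :=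
      hmax r hrks hne
    have h2 : L4 (ccKey (PySem.Dict.counter raw) (choose_canonical_alt raw)) ≤ L4 (ccKey (PySem.Dict.counter raw) r) := by
      rw [hks] at hmem
      rcases List.mem_cons.mp hmem with heq | hmem'
      · rw [heq]; exact rhd
      · exact rall _ hmem'
    exact absurd h2 (not_le.mpr h1)
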